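-- pv_equiv track=rewrite | github.com/heysubhash/Etech_OCR | utils/formatter.py | parse_markdown_style
-- ===== SOURCE A (Python) =====
-- from typing import List, Dict
--
-- def parse_markdown_style(text: str) -> List[Dict]:
--     parsed = []
--     lines = text.splitlines()
--     current_question_number = None
--     current_question = None
--     current_answer_lines = []
--
--     for line in lines:
--         line = line.strip()
--         if line.startswith("### Q"):
--             if current_question_number is not None:
--                 parsed.append({
--                     "question_number": current_question_number,
--                     "question": current_question,
--                     "answer": "\n".join(current_answer_lines).strip() or "Not answered"
--                 })
--             parts = line[4:].split(".", 1)
--             current_question_number = parts[0].strip()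
--             current_question = parts[1].strip() if len(parts) > 1 else ""
--             current_answer_lines = []
--         elif line.startswith("**Answer:**"):
--             current_answer_lines.append(line.replace("**Answer:**", "").strip())
--         elif current_answer_lines is not None:
--             current_answer_lines.append(line)
--
--     if current_question_number is not None:
--         parsed.append({
--             "question_number": current_question_number,
--             "question": current_question,
--             "answer": "\n".join(current_answer_lines).strip() or "Not answered"
--         })
--
--     return parsed
-- ===== SOURCE B (Python) =====
-- def _render(header, body):
--     parts = header[4:].split(".", 1)
--     cleaned = [
--         l.replace("**Answer:**", "").strip() if l.startswith("**Answer:**") else l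
--         for l in body
--     ]
--     return {
--         "question_number": parts[0].strip(),
--         "question": parts[1].strip() if len(parts) > 1 else "",
--         "answer": "\n".join(cleaned).strip() or "Not answered",
--     }
--
--
-- def parse_markdown_style(text):
--     # pass 1: group stripped lines into (header, body) blocks; drop pre-header lines
--     blocks = []
--     for raw in text.splitlines():
--         line = raw.strip()
--         if line.startswith("### Q"):
--             blocks.append((line, []))
--         elif blocks:
--             blocks[-1][1].append(line)
--     # pass 2: render each block into a dict
--     return [_render(header, body) for header, body in blocks]
-- ===== Notes on version B (the rewrite author's own statement) =====
-- stated objective: alternative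
-- what changed: B replaces A's single stateful scan (current question/answer accumulators carried through one loop) by two passes: a grouping pass that collects (header, body-lines) blocks and a rendering pass that parses each header and cleans/joins each body into a dict.
import Mathlib
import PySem

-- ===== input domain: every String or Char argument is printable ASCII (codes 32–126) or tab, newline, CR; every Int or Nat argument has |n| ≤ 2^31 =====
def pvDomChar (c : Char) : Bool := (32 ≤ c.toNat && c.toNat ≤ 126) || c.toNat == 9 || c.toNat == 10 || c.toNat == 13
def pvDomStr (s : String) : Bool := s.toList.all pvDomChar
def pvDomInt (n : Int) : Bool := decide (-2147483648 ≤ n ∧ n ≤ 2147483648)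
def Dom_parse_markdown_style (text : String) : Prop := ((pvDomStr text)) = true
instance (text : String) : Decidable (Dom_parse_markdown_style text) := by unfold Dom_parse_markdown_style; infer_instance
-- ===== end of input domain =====

-- B re-decomposes A's single stateful scan into a grouping pass (blocks of header + body lines)
-- and a rendering pass; same cost, provably the same return value.

-- ===== PORT A =====
def parse_markdown_style (text : String) : List (List (String × String)) :=
  let st := (PySem.Str.splitlines text).foldl
    (fun (st : List (List (String × String)) × Option (String × String) × List String) rawLine =>
      let parsed := st.1
      let cur := st.2.1
      let ansLines := st.2.2
      let line := PySem.Str.strip rawLine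
      if PySem.Str.startswith line "### Q" then
        let parsed' :=
          match cur with
          | some (qn, q) =>
              let joined := PySem.Str.strip (PySem.Str.join "\n" ansLines)
              parsed ++ [[("question_number", qn), ("question", q),
                          ("answer", if joined = "" then "Not answered" else joined)]]
          | none => parsed
        let parts := (PySem.Str.splitMax? (PySem.Str.slice line (some 4) none) "." 1).getD []
        (parsed', some (PySem.Str.strip (parts.headD ""),
                        if parts.length > 1 then PySem.Str.strip (parts.getD 1 "") else ""), [])
      else if PySem.Str.startswith line "**Answer:**" then
        (parsed, cur, ansLines ++ [PySem.Str.strip (PySem.Str.replace line "**Answer:**" "")])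
      else
        (parsed, cur, ansLines ++ [line]))
    ([], none, [])
  match st.2.1 with
  | some (qn, q) =>
      let joined := PySem.Str.strip (PySem.Str.join "\n" st.2.2)
      st.1 ++ [[("question_number", qn), ("question", q),
                ("answer", if joined = "" then "Not answered" else joined)]]
  | none => st.1

-- ===== PORT B =====
-- blocks[-1][1].append(line): append line to the body of the last block (no-op on [])
def pvAppendLast : List (String × List String) → String → List (String × List String)
  | [], _ => []
  | [(h, b)], l => [(h, b ++ [l])]
  | x :: y :: xs, l => x :: pvAppendLast (y :: xs) l

def pvRender (header : String) (body : List String) : List (String × String) :=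
  let parts := (PySem.Str.splitMax? (PySem.Str.slice header (some 4) none) "." 1).getD []
  let cleaned := body.map (fun l =>
    if PySem.Str.startswith l "**Answer:**"
    then PySem.Str.strip (PySem.Str.replace l "**Answer:**" "") else l)
  let ans := PySem.Str.strip (PySem.Str.join "\n" cleaned)
  [("question_number", PySem.Str.strip (parts.headD "")),
   ("question", if parts.length > 1 then PySem.Str.strip (parts.getD 1 "") else ""),
   ("answer", if ans = "" then "Not answered" else ans)]

def parse_markdown_style_alt (text : String) : List (List (String × String)) :=
  let blocks := (PySem.Str.splitlines text).foldl
    (fun (blocks : List (String × List String)) raw =>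
      let line := PySem.Str.strip raw
      if PySem.Str.startswith line "### Q" then blocks ++ [(line, [])]
      else pvAppendLast blocks line)
    []
  blocks.map (fun b => pvRender b.1 b.2)

-- ===== PRECONDITION & SPEC =====
def Spec_parse_markdown_style (text : String) (out : List (List (String × String))) : Prop := out = parse_markdown_style_alt text
instance (text : String) (out : List (List (String × String))) : Decidable (Spec_parse_markdown_style text out) := by unfold Spec_parse_markdown_style; infer_instance

-- ===== CLAIM (what is proved, stated in full; the proofs are below) =====
def Claim_equal_parse_markdown_style : Prop := ∀ (text : String), Dom_parse_markdown_style text → Spec_parse_markdown_style text (parse_markdown_style text)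

-- ===== LEMMAS AND PROOFS =====

-- A's fold state: (parsed dicts, current (qn, question), answer lines so far)
def pvStA : Type := List (List (String × String)) × Option (String × String) × List String

def pvStepA (st : pvStA) (rawLine : String) : pvStA :=
  let parsed := st.1
  let cur := st.2.1
  let ansLines := st.2.2
  let line := PySem.Str.strip rawLine
  if PySem.Str.startswith line "### Q" then
    let parsed' :=
      match cur with
      | some (qn, q) =>
          let joined := PySem.Str.strip (PySem.Str.join "\n" ansLines)
          parsed ++ [[("question_number", qn), ("question", q),
                      ("answer", if joined = "" then "Not answered" else joined)]]
      | none => parsed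
    let parts := (PySem.Str.splitMax? (PySem.Str.slice line (some 4) none) "." 1).getD []
    (parsed', some (PySem.Str.strip (parts.headD ""),
                    if parts.length > 1 then PySem.Str.strip (parts.getD 1 "") else ""), [])
  else if PySem.Str.startswith line "**Answer:**" then
    (parsed, cur, ansLines ++ [PySem.Str.strip (PySem.Str.replace line "**Answer:**" "")])
  else
    (parsed, cur, ansLines ++ [line])

def pvFinishA (st : pvStA) : List (List (String × String)) :=
  match st.2.1 with
  | some (qn, q) =>
      let joined := PySem.Str.strip (PySem.Str.join "\n" st.2.2)
      st.1 ++ [[("question_number", qn), ("question", q),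
                ("answer", if joined = "" then "Not answered" else joined)]]
  | none => st.1

def pvStepB (blocks : List (String × List String)) (raw : String) : List (String × List String) :=
  let line := PySem.Str.strip raw
  if PySem.Str.startswith line "### Q" then blocks ++ [(line, [])]
  else pvAppendLast blocks line

-- how A parses a header line and cleans an answer line (the same expressions both ports use)
def pvHdrQn (h : String) : String :=
  PySem.Str.strip (((PySem.Str.splitMax? (PySem.Str.slice h (some 4) none) "." 1).getD []).headD "")
def pvHdrQ (h : String) : String :=
  let parts := (PySem.Str.splitMax? (PySem.Str.slice h (some 4) none) "." 1).getD []
  if parts.length > 1 then PySem.Str.strip (parts.getD 1 "") else ""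
def pvClean (l : String) : String :=
  if PySem.Str.startswith l "**Answer:**"
  then PySem.Str.strip (PySem.Str.replace l "**Answer:**" "") else l

lemma pvRender_eq (h : String) (body : List String) :
    pvRender h body =
      [("question_number", pvHdrQn h), ("question", pvHdrQ h),
       ("answer",
        let joined := PySem.Str.strip (PySem.Str.join "\n" (body.map pvClean))
        if joined = "" then "Not answered" else joined)] := rfl

-- the relation between A's fold state and B's block list
def pvRel (parsed : List (List (String × String))) (cur : Option (String × String))
    (ans : List String) (blocks : List (String × List String)) : Prop :=
  (cur = none ∧ blocks = [] ∧ parsed = []) ∨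
  (∃ bs h body, cur = some (pvHdrQn h, pvHdrQ h) ∧ blocks = bs ++ [(h, body)] ∧
    ans = body.map pvClean ∧ parsed = bs.map (fun b => pvRender b.1 b.2))

lemma pvAppendLast_snoc (bs : List (String × List String)) (h : String)
    (body : List String) (l : String) :
    pvAppendLast (bs ++ [(h, body)]) l = bs ++ [(h, body ++ [l])] := by
  induction bs with
  | nil => rfl
  | cons x xs ih =>
    cases xs with
    | nil => simp [pvAppendLast]
    | cons y ys => simpa [pvAppendLast] using ih

lemma pvRel_body (parsed : List (List (String × String))) (cur : Option (String × String))
    (ans : List String) (blocks : List (String × List String)) (l : String)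
    (hrel : pvRel parsed cur ans blocks) :
    pvRel parsed cur (ans ++ [pvClean l]) (pvAppendLast blocks l) := by
  rcases hrel with ⟨hc, hb, hp⟩ | ⟨bs, h, body, hc, hb, ha, hp⟩
  · subst hb
    exact Or.inl ⟨hc, rfl, hp⟩
  · subst hb ha
    exact Or.inr ⟨bs, h, body ++ [l], hc,
      pvAppendLast_snoc bs h body l, by simp, hp⟩

lemma pvMain (lines : List String) :
    ∀ (st : pvStA) (blocks : List (String × List String)), pvRel st.1 st.2.1 st.2.2 blocks →
      pvFinishA (lines.foldl pvStepA st) =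
        (lines.foldl pvStepB blocks).map (fun b => pvRender b.1 b.2) := by
  induction lines with
  | nil =>
    intro st blocks hrel
    obtain ⟨parsed, cur, ans⟩ := st
    rcases hrel with ⟨hc, hb, hp⟩ | ⟨bs, h, body, hc, hb, ha, hp⟩
    · simp only at hc hb hp
      subst hc hb hp
      simp [List.foldl, pvFinishA]
    · simp only at hc hb ha hp
      subst hc hb ha hp
      simp [List.foldl, pvFinishA, pvRender_eq]
  | cons raw rest ih =>
    intro st blocks hrel
    simp only [List.foldl]
    apply ih
    obtain ⟨parsed, cur, ans⟩ := st
    show pvRel (pvStepA (parsed, cur, ans) raw).1 (pvStepA (parsed, cur, ans) raw).2.1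
      (pvStepA (parsed, cur, ans) raw).2.2 (pvStepB blocks raw)
    simp only at hrel
    unfold pvStepA pvStepB
    by_cases hq : PySem.Str.startswith (PySem.Str.strip raw) "### Q" = true
    · -- a new header: close the pending block (if any) and open a fresh one
      simp only [if_pos hq]
      rcases hrel with ⟨hc, hb, hp⟩ | ⟨bs, h, body, hc, hb, ha, hp⟩
      · subst hc hb hp
        exact Or.inr ⟨[], PySem.Str.strip raw, [], rfl, rfl, rfl, rfl⟩
      · subst hc hb ha hp
        refine Or.inr ⟨bs ++ [(h, body)], PySem.Str.strip raw, [], rfl, rfl, rfl, ?_⟩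
        simp [pvRender_eq]
    · -- a body line: both sides extend the pending block with the (cleaned) stripped line
      simp only [if_neg hq]
      have key := pvRel_body parsed cur ans blocks (PySem.Str.strip raw) hrel
      unfold pvClean at key
      by_cases hans : PySem.Str.startswith (PySem.Str.strip raw) "**Answer:**" = true
      · simp only [if_pos hans] at key ⊢
        exact key
      · simp only [if_neg hans] at key ⊢
        exact key

-- ===== VERDICT (by name: the statement is the Claim_ definition above) =====
theorem parse_markdown_style_spec : Claim_equal_parse_markdown_style := by
  intro text _
  show parse_markdown_style text = parse_markdown_style_alt text
  exact pvMain (PySem.Str.splitlines text) ([], none, []) [] (Or.inl ⟨rfl, rfl, rfl⟩)
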